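-- pv_equiv track=rewrite | github.com/hitochan777/mt-tools | recover_half_width_words_segmentation.py | overwrite
-- ===== SOURCE A (Python) =====
-- def overwrite(sline, tline):
--     cutIndices = [0]
--     result = []
--     cur = 0
--     sraw = "".join(sline.split(" "))
--     traw = "".join(tline.split(" "))
--
--     assert len(sraw) == len(traw), "The numer of characters in source and target line are different!"
--
--     for word in sline.split(" "):
--         cur +=  len(word)
--         cutIndices.append(cur)
--
--     for i in range(1,len(cutIndices)):
--         result.append(traw[cutIndices[i-1]:cutIndices[i]])
--
--     return " ".join(result)
-- ===== SOURCE B (Python) =====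
-- def overwrite(sline, tline):
--     sraw = "".join(sline.split(" "))
--     traw = "".join(tline.split(" "))
--
--     assert len(sraw) == len(traw), "The numer of characters in source and target line are different!"
--
--     it = iter(traw)
--     return "".join(" " if c == " " else next(it) for c in sline)
-- ===== Notes on version B (the rewrite author's own statement) =====
-- stated objective: alternative
-- what changed: Replaces A's word-boundary machinery (cutIndices prefix-sum table plus a second loop slicing traw into word-sized chunks) with a character-level transduction: walk sline once, copy a space for each space and the next character of traw for each non-space, consuming traw through an iterator; no word list, no index table, no slicing.
import Mathlib
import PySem

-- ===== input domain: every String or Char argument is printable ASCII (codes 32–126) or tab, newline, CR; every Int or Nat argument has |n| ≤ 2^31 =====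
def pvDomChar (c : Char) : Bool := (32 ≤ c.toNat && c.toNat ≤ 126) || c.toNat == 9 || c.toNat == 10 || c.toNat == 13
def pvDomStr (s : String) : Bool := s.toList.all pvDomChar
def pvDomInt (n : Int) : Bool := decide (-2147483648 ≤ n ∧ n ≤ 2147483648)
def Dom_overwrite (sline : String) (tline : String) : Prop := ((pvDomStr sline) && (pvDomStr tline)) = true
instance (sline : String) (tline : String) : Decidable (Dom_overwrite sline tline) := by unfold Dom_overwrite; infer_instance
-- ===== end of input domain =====

-- B replaces A's cutIndices table and word-slicing of traw by a character-level transduction of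
-- sline that consumes traw through an iterator; same result, same assert (modeled by Pre_).

-- ===== PORT A =====
def overwrite (sline : String) (tline : String) : String :=
  let words := PySem.Chars.splitOn sline.toList [' ']
  let _sraw := PySem.Chars.join [] words          -- "".join(sline.split(" ")); used only in the assert (see Pre_)
  let traw := PySem.Chars.join [] (PySem.Chars.splitOn tline.toList [' '])
  -- assert len(sraw) == len(traw): excluded by Pre_overwrite
  let cut := (words.foldl
      (fun (st : List Int × Int) w => (st.1 ++ [st.2 + (w.length : Int)], st.2 + (w.length : Int)))
      ([0], 0)).1
  let result := (PySem.List.pyRange 1 (cut.length : Int) 1).foldl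
      (fun acc i => acc ++ [PySem.List.slice traw
          (some (PySem.List.pyGetD cut (i - 1) 0)) (some (PySem.List.pyGetD cut i 0))]) []
  String.ofList (PySem.Chars.join [' '] result)

-- ===== PORT B =====
-- the generator expression with the iterator 'it' over traw: structural recursion on sline's
-- characters, threading the unconsumed rest of traw (next(it) never fails inside Pre_)
def pvMerge : List Char → List Char → List Char
  | [], _ => []
  | c :: cs, t =>
      if c = ' ' then ' ' :: pvMerge cs t
      else match t with
        | [] => []                         -- next(it) on an exhausted iterator: unreachable inside Pre_
        | x :: ts => x :: pvMerge cs ts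

def overwrite_alt (sline : String) (tline : String) : String :=
  let _sraw := PySem.Chars.join [] (PySem.Chars.splitOn sline.toList [' '])   -- assert only (see Pre_)
  let traw := PySem.Chars.join [] (PySem.Chars.splitOn tline.toList [' '])
  String.ofList (pvMerge sline.toList traw)

-- ===== PRECONDITION & SPEC =====
-- The assert (in both A and B) raises exactly when the space-stripped lines differ in length,
-- i.e. when the numbers of non-space characters differ; those inputs are excluded.
def Pre_overwrite (sline : String) (tline : String) : Prop :=
  (sline.toList.filter (fun c => c ≠ ' ')).length = (tline.toList.filter (fun c => c ≠ ' ')).length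
instance (sline : String) (tline : String) : Decidable (Pre_overwrite sline tline) := by
  unfold Pre_overwrite; infer_instance
def pvWitness_overwrite : String × String := ("ab c", "a bc")

def Spec_overwrite (sline : String) (tline : String) (out : String) : Prop := out = overwrite_alt sline tline
instance (sline : String) (tline : String) (out : String) : Decidable (Spec_overwrite sline tline out) := by unfold Spec_overwrite; infer_instance

-- ===== CLAIM (what is proved, stated in full; the proofs are below) =====
def Claim_equal_overwrite : Prop := ∀ (sline : String) (tline : String), Dom_overwrite sline tline → Pre_overwrite sline tline → Spec_overwrite sline tline (overwrite sline tline)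

-- ===== LEMMAS AND PROOFS =====

-- ---- a clean functional characterisation of single-character splitOn ----
def pvSplit (c : Char) : List Char → List Char → List (List Char)
  | pre, [] => [pre]
  | pre, x :: rest => if x = c then pre :: pvSplit c [] rest else pvSplit c (pre ++ [x]) rest

theorem pvSplit_cons_self (c : Char) (pre rest : List Char) :
    pvSplit c pre (c :: rest) = pre :: pvSplit c [] rest := by simp [pvSplit]

theorem pvSplit_cons_ne (c x : Char) (pre rest : List Char) (hx : x ≠ c) :
    pvSplit c pre (x :: rest) = pvSplit c (pre ++ [x]) rest := by simp [pvSplit, hx]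

theorem pvGo_spec (c : Char) (fuel : Nat) (l cur : List Char) (acc : List (List Char)) (h : l.length ≤ fuel) :
    PySem.Chars.splitOn.go [c] fuel l cur acc = acc.reverse ++ pvSplit c cur.reverse l := by
  induction fuel generalizing l cur acc with
  | zero =>
      have : l = [] := by cases l <;> simp_all
      subst this
      simp [PySem.Chars.splitOn.go, pvSplit]
  | succ f ih =>
      cases l with
      | nil => simp [PySem.Chars.splitOn.go, pvSplit]
      | cons x rest =>
          by_cases hx : x = c
          · subst hx
            have hpre : List.isPrefixOf [x] (x :: rest) = true := by simp [List.isPrefixOf]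
            rw [PySem.Chars.splitOn.go]
            simp only [hpre, if_pos, List.length_cons, List.length_nil, List.drop_succ_cons,
              List.drop_zero]
            rw [ih rest [] (cur.reverse :: acc) (by simpa using h)]
            rw [pvSplit_cons_self]
            simp
          · have hpre : List.isPrefixOf [c] (x :: rest) = false := by
              simp [List.isPrefixOf]; exact fun hh => (hx hh.symm).elim
            rw [PySem.Chars.splitOn.go]
            rw [if_neg (by simp [hpre])]
            rw [ih rest (x :: cur) acc (by simpa using h)]
            rw [pvSplit_cons_ne c x _ _ hx]
            simp

theorem pvSplitOn_eq (c : Char) (l : List Char) :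
    PySem.Chars.splitOn l [c] = pvSplit c [] l := by
  unfold PySem.Chars.splitOn
  rw [pvGo_spec c (l.length + 1) l [] [] (by omega)]
  simp

theorem pvSplit_ne_nil (c : Char) (pre l : List Char) : pvSplit c pre l ≠ [] := by
  induction l generalizing pre with
  | nil => simp [pvSplit]
  | cons x rest ih =>
      by_cases hx : x = c <;> simp [pvSplit, hx, ih]

theorem pvJoin_split (c : Char) (pre l : List Char) :
    PySem.Chars.join [c] (pvSplit c pre l) = pre ++ l := by
  induction l generalizing pre with
  | nil => simp [pvSplit, PySem.Chars.join, List.intercalate]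
  | cons x rest ih =>
      by_cases hx : x = c
      · subst hx
        rw [pvSplit_cons_self]
        cases hq : pvSplit x [] rest with
        | nil => exact absurd hq (pvSplit_ne_nil x [] rest)
        | cons q qs =>
            rw [PySem.Chars.join_cons_cons, ← hq, ih]
            simp
      · rw [pvSplit_cons_ne c x _ _ hx, ih]
        simp

theorem pvFlatten_split (c : Char) (pre l : List Char) :
    PySem.Chars.join [] (pvSplit c pre l) = pre ++ l.filter (fun x => x ≠ c) := by
  induction l generalizing pre with
  | nil => simp [pvSplit, PySem.Chars.join, List.intercalate]
  | cons x rest ih =>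
      by_cases hx : x = c
      · subst hx
        rw [pvSplit_cons_self]
        cases hq : pvSplit x [] rest with
        | nil => exact absurd hq (pvSplit_ne_nil x [] rest)
        | cons q qs =>
            rw [PySem.Chars.join_cons_cons, ← hq, ih]
            simp [List.filter]
      · rw [pvSplit_cons_ne c x _ _ hx, ih]
        simp [List.filter, hx]

theorem pvSplit_no_sep (c : Char) (pre l : List Char) (hpre : c ∉ pre) :
    ∀ w ∈ pvSplit c pre l, c ∉ w := by
  induction l generalizing pre with
  | nil => simpa [pvSplit] using hpre
  | cons x rest ih =>
      by_cases hx : x = c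
      · subst hx
        rw [pvSplit_cons_self]
        intro w hw
        rcases List.mem_cons.mp hw with h | h
        · subst h; exact hpre
        · exact ih [] (by simp) w h
      · rw [pvSplit_cons_ne c x _ _ hx]
        refine ih (pre ++ [x]) ?_
        simp only [List.mem_append, List.mem_singleton]
        rintro (h | h)
        · exact hpre h
        · exact hx h.symm

-- ---- A's slices, in functional form (as in the fold characterisations below) ----
def pvSpecSlices (t : List Char) : List (List Char) → Int → List (List Char)
  | [], _ => []
  | w :: ws, p => PySem.List.slice t (some p) (some (p + (w.length : Int))) :: pvSpecSlices t ws (p + (w.length : Int))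

def pvSegs : List (List Char) → List Char → List (List Char)
  | [], _ => []
  | w :: ws, t => t.take w.length :: pvSegs ws (t.drop w.length)

def pvCuts : List (List Char) → Int → List Int
  | [], c => [c]
  | w :: ws, c => c :: pvCuts ws (c + (w.length : Int))

def pvLast : List (List Char) → Int → Int
  | [], c => c
  | w :: ws, c => pvLast ws (c + (w.length : Int))

theorem pvCuts_length (ws : List (List Char)) (c : Int) : (pvCuts ws c).length = ws.length + 1 := by
  induction ws generalizing c with
  | nil => simp [pvCuts]
  | cons w ws ih => simp [pvCuts, ih]

theorem pvCutFold (ws : List (List Char)) (pre : List Int) (c : Int) :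
    ws.foldl (fun (st : List Int × Int) w => (st.1 ++ [st.2 + (w.length : Int)], st.2 + (w.length : Int)))
      (pre ++ [c], c) = (pre ++ pvCuts ws c, pvLast ws c) := by
  induction ws generalizing pre c with
  | nil => simp [pvCuts, pvLast]
  | cons w ws ih =>
      simp only [List.foldl_cons]
      have h := ih (pre ++ [c]) (c + (w.length : Int))
      simpa [pvCuts, pvLast] using h

theorem pvMapCuts (ws : List (List Char)) (c : Int) (t : List Char) :
    (List.range ws.length).map (fun (k : Nat) => PySem.List.slice t
        (some ((pvCuts ws c).getD k 0)) (some ((pvCuts ws c).getD (k + 1) 0)))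
      = pvSpecSlices t ws c := by
  induction ws generalizing c with
  | nil => simp [pvSpecSlices]
  | cons w ws ih =>
      rw [List.length_cons, List.range_succ_eq_map, List.map_cons, List.map_map]
      congr 1
      · cases ws <;> simp [pvCuts]
      · rw [← ih (c + (w.length : Int))]
        apply List.map_congr_left
        intro k _
        simp [pvCuts, Nat.succ_eq_add_one, List.getD]

theorem pvFlatMapSingle {α β : Type} (g : α → β) (l : List α) :
    List.flatMap (fun x => [g x]) l = l.map g := by
  induction l with
  | nil => rfl
  | cons x l ih => simp [List.flatMap_cons, ih]

theorem pvSlices_eq_segs (t : List Char) (ws : List (List Char)) (p : Nat) :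
    pvSpecSlices t ws (p : Int) = pvSegs ws (t.drop p) := by
  induction ws generalizing p with
  | nil => simp [pvSpecSlices, pvSegs]
  | cons w ws ih =>
      rw [pvSpecSlices, pvSegs]
      congr 1
      · exact PySem.List.slice_natCast_add t p w.length
      · have : (p : Int) + (w.length : Int) = ((p + w.length : Nat) : Int) := by push_cast; ring
        rw [this, ih (p + w.length), List.drop_drop]

-- ---- B's transduction eats one space-free word at a time ----
theorem pvMerge_space (cs t : List Char) : pvMerge (' ' :: cs) t = ' ' :: pvMerge cs t := by
  simp [pvMerge]

theorem pvMerge_word (w : List Char) (hw : ' ' ∉ w) :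
    ∀ (r t : List Char), w.length ≤ t.length →
      pvMerge (w ++ r) t = t.take w.length ++ pvMerge r (t.drop w.length) := by
  induction w with
  | nil => intro r t _; simp
  | cons x cs ih =>
      intro r t hlen
      cases t with
      | nil => simp at hlen
      | cons y ts =>
          have hx : x ≠ ' ' := fun h => hw (h ▸ List.mem_cons_self)
          rw [List.cons_append, pvMerge]
          simp only [if_neg hx]
          rw [ih (fun h => hw (List.mem_cons_of_mem _ h)) r ts (by simpa using Nat.le_of_succ_le_succ hlen)]
          simp

theorem pvSegs_ne_nil (w : List Char) (ws : List (List Char)) (t : List Char) :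
    pvSegs (w :: ws) t ≠ [] := by simp [pvSegs]

theorem pvMerge_join (ws : List (List Char)) (t : List Char)
    (hfree : ∀ w ∈ ws, ' ' ∉ w) (hlen : (PySem.Chars.join [] ws).length ≤ t.length) :
    pvMerge (PySem.Chars.join [' '] ws) t = PySem.Chars.join [' '] (pvSegs ws t) := by
  induction ws generalizing t with
  | nil => simp [pvSegs, PySem.Chars.join, List.intercalate, pvMerge]
  | cons w ws ih =>
      cases ws with
      | nil =>
          have hw : ' ' ∉ w := hfree w (by simp)
          have hl : w.length ≤ t.length := by
            simpa [PySem.Chars.join_singleton] using hlen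
          have h := pvMerge_word w hw [] t hl
          simp only [List.append_nil] at h
          rw [PySem.Chars.join_singleton, h]
          simp [pvSegs, PySem.Chars.join_singleton, pvMerge]
      | cons w' ws' =>
          have hw : ' ' ∉ w := hfree w (by simp)
          rw [PySem.Chars.join_cons_cons, List.append_nil] at hlen
          rw [List.length_append] at hlen
          have hl : w.length ≤ t.length := by omega
          rw [PySem.Chars.join_cons_cons]
          have hsp : w ++ [' '] ++ PySem.Chars.join [' '] (w' :: ws') =
              w ++ (' ' :: PySem.Chars.join [' '] (w' :: ws')) := by simp
          rw [hsp, pvMerge_word w hw _ t hl, pvMerge_space]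
          rw [ih (t.drop w.length) (fun u hu => hfree u (List.mem_cons_of_mem _ hu))
              (by rw [List.length_drop]; omega)]
          conv_rhs => rw [pvSegs]
          cases hq : pvSegs (w' :: ws') (t.drop w.length) with
          | nil => exact absurd hq (pvSegs_ne_nil _ _ _)
          | cons q qs =>
              rw [PySem.Chars.join_cons_cons, ← hq]
              simp

-- ---- A's port equals the join of the functional slices ----
theorem pvA_eq (sline tline : String) :
    overwrite sline tline = String.ofList (PySem.Chars.join [' ']
      (pvSpecSlices (PySem.Chars.join [] (PySem.Chars.splitOn tline.toList [' ']))
        (PySem.Chars.splitOn sline.toList [' ']) 0)) := by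
  unfold overwrite
  dsimp only
  set words := PySem.Chars.splitOn sline.toList [' '] with hw
  set traw := PySem.Chars.join [] (PySem.Chars.splitOn tline.toList [' ']) with ht
  have hcut : (words.foldl
      (fun (st : List Int × Int) w => (st.1 ++ [st.2 + (w.length : Int)], st.2 + (w.length : Int)))
      ([0], 0)).1 = pvCuts words 0 := by
    have h := pvCutFold words [] 0
    simp only [List.nil_append] at h
    rw [h]
  rw [hcut]
  congr 1
  rw [PySem.List.foldl_append_eq_flatMap (fun i => [PySem.List.slice traw
        (some (PySem.List.pyGetD (pvCuts words 0) (i - 1) 0)) (some (PySem.List.pyGetD (pvCuts words 0) i 0))])]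
  rw [List.nil_append, pvCuts_length, PySem.List.pyRange_one, List.flatMap_map, pvFlatMapSingle]
  have hn : (((words.length + 1 : Nat) : Int) - 1).toNat = words.length := by omega
  rw [hn]
  rw [List.map_congr_left (fun (k : Nat) _ => by
        have a1 : (1 : Int) + (k : Int) - 1 = ((k : Nat) : Int) := by ring
        have a2 : (1 : Int) + (k : Int) = ((k + 1 : Nat) : Int) := by push_cast; ring
        rw [a1, a2, PySem.List.pyGetD_natCast, PySem.List.pyGetD_natCast])]
  exact congrArg _ (pvMapCuts words 0 traw)

theorem pvPorts_eq (sline tline : String) (hpre : Pre_overwrite sline tline) :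
    overwrite sline tline = overwrite_alt sline tline := by
  rw [pvA_eq]
  unfold overwrite_alt
  dsimp only
  set traw := PySem.Chars.join [] (PySem.Chars.splitOn tline.toList [' ']) with ht
  have htraw : traw = tline.toList.filter (fun x => x ≠ ' ') := by
    rw [ht, pvSplitOn_eq ' ' tline.toList]
    simpa using pvFlatten_split ' ' [] tline.toList
  have hwordsS : PySem.Chars.splitOn sline.toList [' '] = pvSplit ' ' [] sline.toList :=
    pvSplitOn_eq ' ' sline.toList
  have hjoin : PySem.Chars.join [' '] (pvSplit ' ' [] sline.toList) = sline.toList := by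
    simpa using pvJoin_split ' ' [] sline.toList
  have hfree : ∀ w ∈ pvSplit ' ' [] sline.toList, ' ' ∉ w :=
    pvSplit_no_sep ' ' [] sline.toList (by simp)
  have hlen : (PySem.Chars.join [] (pvSplit ' ' [] sline.toList)).length ≤ traw.length := by
    rw [htraw]
    have h := pvFlatten_split ' ' [] sline.toList
    rw [List.nil_append] at h
    rw [h]
    exact le_of_eq hpre
  have hs := pvSlices_eq_segs traw (pvSplit ' ' [] sline.toList) 0
  rw [Nat.cast_zero] at hs
  congr 1
  rw [hwordsS, hs, List.drop_zero, ← pvMerge_join _ _ hfree hlen, hjoin]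

-- ===== VERDICT (by name: the statement is the Claim_ definition above) =====
theorem overwrite_spec : Claim_equal_overwrite := by
  intro sline tline _ hpre
  unfold Spec_overwrite
  exact pvPorts_eq sline tline hpre
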